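-- pv_equiv track=rewrite | github.com/rmehta1987/flyteTest | src/flytetest/tasks/agat.py | _set_attribute
-- ===== SOURCE A (Python) =====
-- def _set_attribute(attributes: list[tuple[str, str | None]], key: str, value: str) -> tuple[list[tuple[str, str | None]], bool]:
--     """Set one attribute value, preserving position when the key already exists."""
--     updated: list[tuple[str, str | None]] = []
--     found = False
--     changed = False
--     for attribute_key, attribute_value in attributes:
--         if attribute_key == key:
--             if not found:
--                 updated.append((attribute_key, value))
--                 changed = attribute_value != value
--                 found = True
--             else:
--                 changed = True
--             continue
--         updated.append((attribute_key, attribute_value))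
--     if found:
--         return updated, changed
--     updated.append((key, value))
--     return updated, True
-- ===== SOURCE B (Python) =====
-- def _set_attribute(attributes, key, value):
--     """Set one attribute value, preserving position when the key already exists."""
--     keys = [k for k, _ in attributes]
--     if key not in keys:
--         return attributes + [(key, value)], True
--     i = keys.index(key)
--     updated = attributes[:i] + [(key, value)] + [p for p in attributes[i + 1:] if p[0] != key]
--     return updated, updated != attributes
-- ===== Notes on version B (the rewrite author's own statement) =====
-- stated objective: simpler
-- what changed: B locates the first occurrence by index and builds the result as slice + replacement + filtered tail instead of threading found/changed flags through a loop; the changed flag becomes a single structural comparison updated != attributes.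
import Mathlib
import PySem

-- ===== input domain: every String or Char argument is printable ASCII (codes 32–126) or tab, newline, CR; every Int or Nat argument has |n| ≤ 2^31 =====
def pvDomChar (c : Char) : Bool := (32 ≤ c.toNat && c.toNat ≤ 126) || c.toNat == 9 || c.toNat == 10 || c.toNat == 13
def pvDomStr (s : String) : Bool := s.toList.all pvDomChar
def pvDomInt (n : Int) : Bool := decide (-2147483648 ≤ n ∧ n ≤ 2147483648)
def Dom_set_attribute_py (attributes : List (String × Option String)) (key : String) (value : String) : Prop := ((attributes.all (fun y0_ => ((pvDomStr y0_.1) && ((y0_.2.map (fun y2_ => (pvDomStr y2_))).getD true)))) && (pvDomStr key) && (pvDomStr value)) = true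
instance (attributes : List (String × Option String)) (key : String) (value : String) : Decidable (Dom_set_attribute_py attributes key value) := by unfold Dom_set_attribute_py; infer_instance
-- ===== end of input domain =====

-- B replaces A's flag-threading loop by: find the first index of the key, build the result as
-- slice + replacement + filtered tail, and compute `changed` as one structural comparison
-- `updated != attributes` (objective: simpler).

-- ===== PORT A =====
-- the for-loop of A as structural recursion over the same (found, changed) state
def setAttrLoopA (key value : String) :
    List (String × Option String) → Bool → Bool → (List (String × Option String)) × Bool × Bool
  | [], found, changed => ([], found, changed)
  | (k, v) :: rest, found, changed =>
    if k = key then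
      if found then
        setAttrLoopA key value rest found true
      else
        let r := setAttrLoopA key value rest true (decide (v ≠ some value))
        ((k, some value) :: r.1, r.2.1, r.2.2)
    else
      let r := setAttrLoopA key value rest found changed
      ((k, v) :: r.1, r.2.1, r.2.2)

def set_attribute_py (attributes : List (String × Option String)) (key : String) (value : String) : (List (String × Option String)) × Bool :=
  let r := setAttrLoopA key value attributes false false
  if r.2.1 then (r.1, r.2.2) else (r.1 ++ [(key, some value)], true)

-- ===== PORT B =====
def set_attribute_py_alt (attributes : List (String × Option String)) (key : String) (value : String) : (List (String × Option String)) × Bool :=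
  let keys := attributes.map Prod.fst
  if key ∈ keys then
    match PySem.List.index? keys key with
    | some i =>
      -- attributes[:i] / attributes[i+1:] with a nonnegative index are take/drop (exact here)
      let updated := attributes.take i ++ [(key, some value)] ++
        (attributes.drop (i + 1)).filter (fun p => p.1 != key)
      (updated, decide (updated ≠ attributes))
    | none => (attributes, false)  -- unreachable: key ∈ keys guarantees index? = some
  else
    (attributes ++ [(key, some value)], true)

-- ===== PRECONDITION & SPEC =====
def Spec_set_attribute_py (attributes : List (String × Option String)) (key : String) (value : String) (out : (List (String × Option String)) × Bool) : Prop := out = set_attribute_py_alt attributes key value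
instance (attributes : List (String × Option String)) (key : String) (value : String) (out : (List (String × Option String)) × Bool) : Decidable (Spec_set_attribute_py attributes key value out) := by unfold Spec_set_attribute_py; infer_instance

-- ===== CLAIM (what is proved, stated in full; the proofs are below) =====
def Claim_equal_set_attribute_py : Prop := ∀ (attributes : List (String × Option String)) (key : String) (value : String), Dom_set_attribute_py attributes key value → Spec_set_attribute_py attributes key value (set_attribute_py attributes key value)

-- ===== LEMMAS AND PROOFS =====

-- proof-only helper: the result list once the first occurrence was found
def keepFirst (key value : String) : List (String × Option String) → List (String × Option String)
  | [] => []
  | (k, v) :: rest =>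
    if k = key then (key, some value) :: rest.filter (fun p => p.1 != key)
    else (k, v) :: keepFirst key value rest

theorem setAttrLoopA_found (key value : String) :
    ∀ (l : List (String × Option String)) (c : Bool),
      setAttrLoopA key value l true c =
        (l.filter (fun p => p.1 != key), true, c || l.any (fun p => p.1 == key)) := by
  intro l
  induction l with
  | nil => simp [setAttrLoopA]
  | cons hd tl ih =>
    intro c
    obtain ⟨k, v⟩ := hd
    by_cases hk : k = key
    · simp [setAttrLoopA, hk, ih]
    · have hb : (k == key) = false := by simpa using hk
      simp [setAttrLoopA, hk, ih, hb]

theorem setAttrLoopA_absent (key value : String) :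
    ∀ (l : List (String × Option String)), key ∉ l.map Prod.fst →
      ∀ (f c : Bool), setAttrLoopA key value l f c = (l, f, c) := by
  intro l
  induction l with
  | nil => simp [setAttrLoopA]
  | cons hd tl ih =>
    intro h f c
    obtain ⟨k, v⟩ := hd
    simp only [List.map_cons, List.mem_cons, not_or] at h
    simp [setAttrLoopA, Ne.symm h.1, ih h.2]

theorem filter_eq_self_iff_any (key : String) (l : List (String × Option String)) :
    (l.filter (fun p => p.1 != key) = l) ↔ (l.any (fun p => p.1 == key) = false) := by
  rw [List.filter_eq_self, List.any_eq_false]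
  simp

theorem setAttrLoopA_present (key value : String) :
    ∀ (l : List (String × Option String)), key ∈ l.map Prod.fst →
      setAttrLoopA key value l false false =
        (keepFirst key value l, true, decide (keepFirst key value l ≠ l)) := by
  intro l
  induction l with
  | nil => simp
  | cons hd tl ih =>
    intro h
    obtain ⟨k, v⟩ := hd
    by_cases hk : k = key
    · subst hk
      have hA : setAttrLoopA k value ((k, v) :: tl) false false
          = ((k, some value) :: tl.filter (fun p => p.1 != k), true,
             decide (v ≠ some value) || tl.any fun p => p.1 == k) := by
        simp [setAttrLoopA, setAttrLoopA_found]
      have hK : keepFirst k value ((k, v) :: tl)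
          = (k, some value) :: tl.filter (fun p => p.1 != k) := by
        simp [keepFirst]
      rw [hA, hK, Prod.mk.injEq, Prod.mk.injEq]
      refine ⟨rfl, rfl, ?_⟩
      by_cases hv : v = some value
      · subst hv
        by_cases ha : tl.any (fun p => p.1 == k) = true
        · have hne : ¬ ((k, some value) :: tl.filter (fun p => p.1 != k) = (k, some value) :: tl) := by
            intro he
            have hft : tl.filter (fun p => p.1 != k) = tl := (List.cons_eq_cons.mp he).2
            rw [filter_eq_self_iff_any] at hft
            simp [hft] at ha
          simp [hne, ha]
        · have ha' : tl.any (fun p => p.1 == k) = false := by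
            cases hx : tl.any (fun p => p.1 == k) with
            | false => rfl
            | true => exact absurd hx ha
          have hf : tl.filter (fun p => p.1 != k) = tl :=
            (filter_eq_self_iff_any k tl).mpr ha'
          simp [ha', hf]
      · have hne : ¬ ((k, some value) :: tl.filter (fun p => p.1 != k) = (k, v) :: tl) := by
          intro he
          exact hv ((Prod.mk.injEq _ _ _ _ ▸ (List.cons_eq_cons.mp he).1).2.symm)
        simp [hv, hne]
    · have hmem : key ∈ tl.map Prod.fst := by
        simpa [Ne.symm hk] using h
      simp [setAttrLoopA, hk, ih hmem, keepFirst]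

theorem alt_present (key value : String) :
    ∀ (l : List (String × Option String)), key ∈ l.map Prod.fst →
      set_attribute_py_alt l key value =
        (keepFirst key value l, decide (keepFirst key value l ≠ l)) := by
  intro l
  induction l with
  | nil => simp
  | cons hd tl ih =>
    intro h
    obtain ⟨k, v⟩ := hd
    by_cases hk : k = key
    · subst hk
      have h0 : List.idxOf? k (k :: List.map Prod.fst tl) = some 0 := by
        simpa using PySem.List.index?_cons_self k (List.map Prod.fst tl)
      simp [set_attribute_py_alt, keepFirst, h0]
    · have hmem : key ∈ tl.map Prod.fst := by simpa [Ne.symm hk] using h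
      have := ih hmem
      simp only [set_attribute_py_alt, if_pos hmem] at this
      rcases hidx : PySem.List.index? (tl.map Prod.fst) key with _ | i
      · rw [PySem.List.index?_eq_none_iff] at hidx
        exact absurd hmem hidx
      · rw [hidx] at this
        simp only at this
        have hcons : PySem.List.index? ((k, v) :: tl |>.map Prod.fst) key = some (i + 1) := by
          simp only [List.map_cons]
          rw [PySem.List.index?_cons_of_ne _ hk, hidx]
          rfl
        simp only [set_attribute_py_alt, List.map_cons, List.mem_cons, Ne.symm hk,
          false_or, if_pos hmem]
        rw [show PySem.List.index? (k :: tl.map Prod.fst) key = some (i + 1) by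
          simpa using hcons]
        simp only [List.take_succ_cons, List.drop_succ_cons, List.cons_append]
        have heq := congrArg Prod.fst this
        simp only at heq
        simp only [keepFirst]
        simp [hk, heq]

-- ===== VERDICT (by name: the statement is the Claim_ definition above) =====
theorem set_attribute_py_spec : Claim_equal_set_attribute_py := by
  intro attributes key value _
  unfold Spec_set_attribute_py
  by_cases h : key ∈ attributes.map Prod.fst
  · rw [alt_present key value attributes h]
    simp [set_attribute_py, setAttrLoopA_present key value attributes h]
  · have hne : ∀ p ∈ attributes, p.1 ≠ key := by
      intro p hp he
      exact h (he ▸ List.mem_map_of_mem hp)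
    have := setAttrLoopA_absent key value attributes h false false
    simp [set_attribute_py, set_attribute_py_alt, this, h]
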